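-- pv_equiv track=rewrite | github.com/alina-aks/algorithms-and-data-structures | lab6/task7/src/task7.py | Precious_stones
-- ===== SOURCE A (Python) =====
-- def Precious_stones(n, k, s, pairs):
--     beautiful_pairs = {}
--     for a, b in pairs:
--         if a not in beautiful_pairs:
--             beautiful_pairs[a] = set()
--         beautiful_pairs[a].add(b)
--
--     stone_count = {}
--     result = 0
--
--     for i in range(n):
--         current_stone = s[i]
--
--         if current_stone in beautiful_pairs:
--             for b in beautiful_pairs[current_stone]:
--                 if b in stone_count:
--                     result += stone_count[b]
--
--         if current_stone in stone_count:
--             stone_count[current_stone] += 1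
--         else:
--             stone_count[current_stone] = 1
--
--     return result
-- ===== SOURCE B (Python) =====
-- def Precious_stones(n, k, s, pairs):
--     m = n if n > 0 else 0
--     positions = {}
--     for i in range(m):
--         positions.setdefault(s[i], []).append(i)
--     total = 0
--     for a, b in set(pairs):
--         for i in positions.get(a, []):
--             for j in positions.get(b, []):
--                 if j < i:
--                     total += 1
--     return total
-- ===== Notes on version B (the rewrite author's own statement) =====
-- stated objective: alternative
-- what changed: B builds a color-to-sorted-position-list index in one pass and sums, for each deduplicated beautiful edge (a,b), the number of b-positions strictly before each a-position, replacing A's stone-by-stone sweep that keeps running counts and queries the edge adjacency at every stone.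
import Mathlib
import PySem

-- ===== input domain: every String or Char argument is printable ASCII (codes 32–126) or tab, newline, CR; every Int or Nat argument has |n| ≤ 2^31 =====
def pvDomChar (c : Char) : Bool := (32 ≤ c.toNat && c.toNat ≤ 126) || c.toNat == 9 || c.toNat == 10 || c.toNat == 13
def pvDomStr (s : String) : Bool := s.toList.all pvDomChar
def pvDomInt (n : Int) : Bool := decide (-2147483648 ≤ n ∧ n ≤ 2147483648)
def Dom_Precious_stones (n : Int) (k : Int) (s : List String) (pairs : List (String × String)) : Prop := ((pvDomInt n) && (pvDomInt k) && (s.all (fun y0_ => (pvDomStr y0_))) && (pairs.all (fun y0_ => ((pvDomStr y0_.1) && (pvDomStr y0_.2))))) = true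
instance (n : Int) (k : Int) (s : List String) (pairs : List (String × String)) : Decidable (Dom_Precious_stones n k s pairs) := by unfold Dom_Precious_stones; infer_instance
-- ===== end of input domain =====

-- B counts edge-wise over a prebuilt color→positions index instead of A's stone-wise sweep
-- with running counts (objective: alternative); return values agree on Pre_.

-- ===== PORT A =====
def Precious_stones (n : Int) (k : Int) (s : List String) (pairs : List (String × String)) : Int :=
  -- beautiful_pairs: dict color -> set of colors
  let bp : PySem.Dict String (PySem.Set String) :=
    pairs.foldl (fun d p =>
      let d' := if d.contains p.1 then d else d.insert p.1 PySem.Set.empty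
      d'.modify p.1 PySem.Set.empty (fun st => PySem.Set.add st p.2)) PySem.Dict.empty
  -- main loop: state = (result, stone_count); s[i] is in range on Pre_
  let final :=
    (PySem.List.pyRange 0 n 1).foldl (fun (st : Int × PySem.Dict String Int) i =>
      let cur := PySem.List.pyGetD s i ""
      let res :=
        match bp.get? cur with
        | some bs => bs.foldl (fun r b => if st.2.contains b then r + st.2.getD b 0 else r) st.1
        | none => st.1
      let sc := if st.2.contains cur then st.2.insert cur (st.2.getD cur 0 + 1) else st.2.insert cur 1
      (res, sc)) ((0 : Int), PySem.Dict.empty)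
  final.1

-- ===== PORT B =====
def Precious_stones_alt (n : Int) (k : Int) (s : List String) (pairs : List (String × String)) : Int :=
  let m : Int := if n > 0 then n else 0
  -- positions: color -> ascending list of indices; s[i] is in range on Pre_
  let positions : PySem.Dict String (List Int) :=
    (PySem.List.pyRange 0 m 1).foldl
      (fun d i => d.modify (PySem.List.pyGetD s i "") [] (fun l => l ++ [i])) PySem.Dict.empty
  (PySem.Set.ofList pairs).foldl (fun total p =>
    (positions.getD p.1 []).foldl (fun t i =>
      (positions.getD p.2 []).foldl (fun t j => if j < i then t + 1 else t) t) total) 0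

-- ===== PRECONDITION & SPEC =====
-- Pre_ excludes exactly the inputs where the Python A raises IndexError (n exceeds len(s)).
def Pre_Precious_stones (n : Int) (k : Int) (s : List String) (pairs : List (String × String)) : Prop :=
  n ≤ (s.length : Int)
instance (n : Int) (k : Int) (s : List String) (pairs : List (String × String)) : Decidable (Pre_Precious_stones n k s pairs) := by unfold Pre_Precious_stones; infer_instance

def pvWitness_Precious_stones : Int × Int × List String × (List (String × String)) :=
  (3, 0, ["a", "b", "a"], [("a", "b")])

def Spec_Precious_stones (n : Int) (k : Int) (s : List String) (pairs : List (String × String)) (out : Int) : Prop := out = Precious_stones_alt n k s pairs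
instance (n : Int) (k : Int) (s : List String) (pairs : List (String × String)) (out : Int) : Decidable (Spec_Precious_stones n k s pairs out) := by unfold Spec_Precious_stones; infer_instance

-- ===== CLAIM (what is proved, stated in full; the proofs are below) =====
def Claim_equal_Precious_stones : Prop := ∀ (n : Int) (k : Int) (s : List String) (pairs : List (String × String)), Dom_Precious_stones n k s pairs → Pre_Precious_stones n k s pairs → Spec_Precious_stones n k s pairs (Precious_stones n k s pairs)

-- ===== LEMMAS AND PROOFS =====

-- value of stone i
def pvVal (s : List String) (i : Nat) : String := s.getD i ""
-- number of occurrences of b strictly before position i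
def pvCnt (s : List String) (b : String) (i : Nat) : Int :=
  ((List.range i).countP (fun j => pvVal s j == b) : Int)
-- contribution of the ordered pair (a, b) over the first m stones
def pvG (s : List String) (m : Nat) (a b : String) : Int :=
  (((List.range m).filter (fun i => pvVal s i == a)).map (pvCnt s b)).sum
-- the simplified builder step of A's beautiful_pairs dict
def pvStepBP (d : PySem.Dict String (PySem.Set String)) (p : String × String) :
    PySem.Dict String (PySem.Set String) :=
  d.modify p.1 PySem.Set.empty (fun st => PySem.Set.add st p.2)
def pvBP (pairs : List (String × String)) : PySem.Dict String (PySem.Set String) :=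
  pairs.foldl pvStepBP PySem.Dict.empty
-- flatten a dict-of-sets into its edge list
def pvEdges (d : PySem.Dict String (PySem.Set String)) : List (String × String) :=
  d.items.flatMap (fun p => (p.2 : List String).map (fun b => (p.1, b)))
-- closed form of A's running result after m steps
def pvRes (s : List String) (bp : PySem.Dict String (PySem.Set String)) (m : Nat) : Int :=
  ((List.range m).map (fun i =>
    (((bp.getD (pvVal s i) PySem.Set.empty) : List String).map (fun b => pvCnt s b i)).sum)).sum
-- A's main-loop step, over Nat indices
def pvStepA (s : List String) (bp : PySem.Dict String (PySem.Set String))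
    (st : Int × PySem.Dict String Int) (i : Nat) : Int × PySem.Dict String Int :=
  let cur := pvVal s i
  let res :=
    match bp.get? cur with
    | some bs => bs.foldl (fun r b => if st.2.contains b then r + st.2.getD b 0 else r) st.1
    | none => st.1
  let sc := if st.2.contains cur then st.2.insert cur (st.2.getD cur 0 + 1) else st.2.insert cur 1
  (res, sc)

-- general sum lemmas
lemma pv_sum_flatMap {α : Type} (l : List α) (f : α → List Int) :
    (l.flatMap f).sum = (l.map (fun x => (f x).sum)).sum := by
  induction l with
  | nil => rfl
  | cons x t ih => simp [List.flatMap_cons, List.sum_append, ih]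

lemma pv_sum_comm {α β : Type} (l1 : List α) (l2 : List β) (F : α → β → Int) :
    (l1.map (fun x => (l2.map (F x)).sum)).sum
      = (l2.map (fun y => (l1.map (fun x => F x y)).sum)).sum := by
  induction l1 with
  | nil => simp
  | cons x t ih =>
    simp only [List.map_cons, List.sum_cons, ih]
    rw [PySem.List.sum_map_add_int]

lemma pv_sum_filter {α : Type} (l : List α) (p : α → Bool) (f : α → Int) :
    ((l.filter p).map f).sum = (l.map (fun x => if p x then f x else 0)).sum := by
  induction l with
  | nil => rfl
  | cons x t ih => by_cases h : p x <;> simp [h, ih]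

lemma pv_pyRange (n : Int) :
    PySem.List.pyRange 0 n 1 = (List.range n.toNat).map (fun k : Nat => (k : Int)) := by
  cases n with
  | ofNat m => exact PySem.List.pyRange_zero_natCast m
  | negSucc m => simp [PySem.List.pyRange]

lemma pv_countP_range (q : Nat → Bool) (i m : Nat) (h : i ≤ m) :
    (List.range m).countP (fun j => q j && decide (j < i)) = (List.range i).countP q := by
  have hm : m = i + (m - i) := by omega
  rw [hm, List.range_add, List.countP_append, List.countP_map]
  have h1 : (List.range i).countP (fun j => q j && decide (j < i)) = (List.range i).countP q :=
    List.countP_congr (by intro x hx; simp only [List.mem_range] at hx; simp [hx])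
  have h2 : (List.range (m - i)).countP ((fun j => q j && decide (j < i)) ∘ (fun x => i + x)) = 0 :=
    List.countP_eq_zero.mpr (by
      intro x hx
      simp only [Function.comp_apply, Bool.and_eq_true, decide_eq_true_eq, not_and]
      intro _; omega)
  rw [h1, h2, Nat.add_zero]

-- summing a per-key contribution over a dict's items against a single key
lemma pv_dict_sum_aux (items : List (String × PySem.Set String))
    (hnd : (items.map Prod.fst).Nodup) (c : String) (F : String → Int) :
    (items.map (fun p => if p.1 = c then ((p.2 : List String).map F).sum else 0)).sum
      = (((PySem.Dict.mk items).getD c PySem.Set.empty : List String).map F).sum := by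
  induction items with
  | nil => simp [PySem.Dict.getD_eq_get?_getD, PySem.Dict.get?]
  | cons p rest ih =>
    obtain ⟨a, v⟩ := p
    simp only [List.map_cons, List.nodup_cons, List.mem_map] at hnd
    simp only [List.map_cons, List.sum_cons]
    rw [PySem.Dict.getD_eq_get?_getD, PySem.Dict.get?_mk_cons]
    by_cases h : a = c
    · subst h
      simp only [beq_self_eq_true, if_true, Option.getD_some]
      have hz : (rest.map (fun p => if p.1 = a then ((p.2 : List String).map F).sum else 0)).sum = 0 := by
        apply List.sum_eq_zero
        intro x hx
        obtain ⟨q, hq, rfl⟩ := List.mem_map.mp hx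
        have : q.1 ≠ a := fun he => hnd.1 ⟨q, hq, he⟩
        simp [this]
      rw [hz, add_zero]
    · have hba : (a == c) = false := by simp [h]
      rw [if_neg h]
      simp only [hba, Bool.false_eq_true, if_false, zero_add]
      rw [ih hnd.2, PySem.Dict.getD_eq_get?_getD]

-- A's guarded dict-building step is pvStepBP
lemma pv_bp_step_eq (d : PySem.Dict String (PySem.Set String)) (p : String × String) :
    (let d' := if d.contains p.1 then d else d.insert p.1 PySem.Set.empty
     d'.modify p.1 PySem.Set.empty (fun st => PySem.Set.add st p.2)) = pvStepBP d p := by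
  show (if d.contains p.1 then d else d.insert p.1 PySem.Set.empty).modify p.1 PySem.Set.empty
      (fun st => PySem.Set.add st p.2) = pvStepBP d p
  cases hc : d.contains p.1 with
  | true => simp [pvStepBP]
  | false =>
    simp only [Bool.false_eq_true, if_false, pvStepBP, PySem.Dict.modify,
      PySem.Dict.getD_insert_self, PySem.Dict.insert_insert_self,
      PySem.Dict.getD_of_not_contains _ _ hc]

lemma pv_bp_keys_nodup (pairs : List (String × String)) : (pvBP pairs).keys.Nodup := by
  unfold pvBP pvStepBP
  exact PySem.Dict.nodup_keys_foldl_modify_key pairs Prod.fst PySem.Set.empty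
    (fun _ p st => PySem.Set.add st p.2) PySem.Dict.empty PySem.Dict.nodup_keys_empty

lemma pv_mem_bp_getD_aux (l : List (String × String)) (d : PySem.Dict String (PySem.Set String))
    (a b : String) :
    b ∈ ((l.foldl pvStepBP d).getD a PySem.Set.empty : List String)
      ↔ b ∈ (d.getD a PySem.Set.empty : List String) ∨ (a, b) ∈ l := by
  induction l generalizing d with
  | nil => simp
  | cons p t ih =>
    rw [List.foldl_cons, ih]
    unfold pvStepBP
    rw [PySem.Dict.getD_modify]
    by_cases h : a = p.1
    · subst h
      simp [PySem.Set.mem_add, Prod.ext_iff]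
      tauto
    · simp [h, Prod.ext_iff]

lemma pv_bp_getD_nodup_aux (l : List (String × String)) (d : PySem.Dict String (PySem.Set String))
    (h : ∀ a, ((d.getD a PySem.Set.empty) : List String).Nodup) (a : String) :
    ((l.foldl pvStepBP d).getD a PySem.Set.empty : List String).Nodup := by
  induction l generalizing d with
  | nil => exact h a
  | cons p t ih =>
    rw [List.foldl_cons]
    apply ih
    intro c
    unfold pvStepBP
    rw [PySem.Dict.getD_modify]
    split
    · exact PySem.Set.nodup_add _ _ (h p.1)
    · exact h c

lemma pv_nodup_flat (items : List (String × PySem.Set String))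
    (hk : (items.map Prod.fst).Nodup) (hv : ∀ p ∈ items, (p.2 : List String).Nodup) :
    (items.flatMap (fun p => (p.2 : List String).map (fun b => (p.1, b)))).Nodup := by
  induction items with
  | nil => simp
  | cons p rest ih =>
    simp only [List.map_cons, List.nodup_cons, List.mem_map] at hk
    rw [List.flatMap_cons]
    apply List.Nodup.append
    · exact List.Nodup.map (fun x y hxy => by simpa using congrArg Prod.snd hxy)
        (hv p (by simp))
    · exact ih hk.2 (fun q hq => hv q (by simp [hq]))
    · intro x hx1 hx2
      obtain ⟨b, _, rfl⟩ := List.mem_map.mp hx1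
      obtain ⟨q, hq, hxq⟩ := List.mem_flatMap.mp hx2
      obtain ⟨b', _, hb'⟩ := List.mem_map.mp hxq
      exact hk.1 ⟨q, hq, by rw [← congrArg Prod.fst hb']⟩

lemma pv_edges_nodup (pairs : List (String × String)) : (pvEdges (pvBP pairs)).Nodup := by
  apply pv_nodup_flat
  · have := pv_bp_keys_nodup pairs
    simpa [PySem.Dict.keys] using this
  · intro p hp
    have h1 : ((pvBP pairs).getD p.1 PySem.Set.empty : List String) = p.2 :=
      PySem.Dict.getD_of_mem_items _ hp (pv_bp_keys_nodup pairs) _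
    rw [← h1]
    exact pv_bp_getD_nodup_aux pairs PySem.Dict.empty
      (fun a => by rw [PySem.Dict.getD_empty]; exact List.nodup_nil) p.1

lemma pv_mem_edges (d : PySem.Dict String (PySem.Set String)) (hnd : d.keys.Nodup)
    (a b : String) :
    (a, b) ∈ pvEdges d ↔ b ∈ ((d.getD a PySem.Set.empty) : List String) := by
  unfold pvEdges
  rw [List.mem_flatMap]
  constructor
  · rintro ⟨p, hp, hm⟩
    obtain ⟨pa, pb⟩ := p
    obtain ⟨b', hb', he⟩ := List.mem_map.mp hm
    obtain ⟨h1, h2⟩ : pa = a ∧ b' = b := ⟨congrArg Prod.fst he, congrArg Prod.snd he⟩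
    subst h1; subst h2
    rwa [PySem.Dict.getD_of_mem_items d hp hnd]
  · intro hb
    cases hq : d.get? a with
    | none =>
      rw [PySem.Dict.getD_eq_get?_getD, hq] at hb
      simp [PySem.Set.empty] at hb
    | some bs =>
      refine ⟨(a, bs), (PySem.Dict.get?_eq_some_iff_mem_items d a bs hnd).mp hq, ?_⟩
      rw [PySem.Dict.getD_eq_get?_getD, hq] at hb
      exact List.mem_map.mpr ⟨b, hb, rfl⟩

lemma pv_edges_perm (pairs : List (String × String)) :
    (pvEdges (pvBP pairs)).Perm (PySem.Set.ofList pairs) := by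
  rw [List.perm_ext_iff_of_nodup (pv_edges_nodup pairs) (PySem.Set.nodup_ofList pairs)]
  rintro ⟨a, b⟩
  rw [pv_mem_edges _ (pv_bp_keys_nodup pairs), PySem.Set.mem_ofList]
  unfold pvBP
  rw [pv_mem_bp_getD_aux]
  simp [PySem.Dict.getD_empty, PySem.Set.empty]

lemma pv_counter_getD (s : List String) (m : Nat) (b : String) :
    (PySem.Dict.counter ((List.range m).map (pvVal s))).getD b 0 = pvCnt s b m := by
  rw [PySem.Dict.getD_counter, pvCnt, List.count_eq_countP, List.countP_map]
  rfl

-- A's loop in closed form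
lemma pv_loopA (s : List String) (bp : PySem.Dict String (PySem.Set String)) (m : Nat) :
    (List.range m).foldl (pvStepA s bp) ((0 : Int), PySem.Dict.empty)
      = (pvRes s bp m, PySem.Dict.counter ((List.range m).map (pvVal s))) := by
  induction m with
  | zero => rfl
  | succ m ih =>
    conv_lhs => rw [List.range_succ]
    rw [List.foldl_append, ih, List.foldl_cons, List.foldl_nil]
    have hsnd : (List.range (m + 1)).map (pvVal s) = (List.range m).map (pvVal s) ++ [pvVal s m] := by
      rw [List.range_succ, List.map_append, List.map_cons, List.map_nil]
    unfold pvStepA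
    apply Prod.ext
    · -- result component
      show (match bp.get? (pvVal s m) with
        | some bs => bs.foldl (fun r b => if (PySem.Dict.counter ((List.range m).map (pvVal s))).contains b
            then r + (PySem.Dict.counter ((List.range m).map (pvVal s))).getD b 0 else r) (pvRes s bp m)
        | none => pvRes s bp m) = pvRes s bp (m + 1)
      have hres : pvRes s bp (m + 1) = pvRes s bp m
          + (((bp.getD (pvVal s m) PySem.Set.empty) : List String).map (fun b => pvCnt s b m)).sum := by
        rw [pvRes, pvRes, List.range_succ, List.map_append, List.sum_append, List.map_cons,
          List.map_nil, List.sum_cons, List.sum_nil, add_zero]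
      cases hq : bp.get? (pvVal s m) with
      | none =>
        show pvRes s bp m = pvRes s bp (m + 1)
        rw [hres, PySem.Dict.getD_eq_get?_getD, hq]
        simp [PySem.Set.empty]
      | some bs =>
        show bs.foldl (fun r b => if (PySem.Dict.counter ((List.range m).map (pvVal s))).contains b
            then r + (PySem.Dict.counter ((List.range m).map (pvVal s))).getD b 0 else r) (pvRes s bp m)
          = pvRes s bp (m + 1)
        have hfold : bs.foldl (fun r b => if (PySem.Dict.counter ((List.range m).map (pvVal s))).contains b
            then r + (PySem.Dict.counter ((List.range m).map (pvVal s))).getD b 0 else r) (pvRes s bp m)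
            = bs.foldl (fun r b => r + (PySem.Dict.counter ((List.range m).map (pvVal s))).getD b 0) (pvRes s bp m) := by
          apply PySem.List.foldl_congr_mem
          intro acc b _
          cases hc : (PySem.Dict.counter ((List.range m).map (pvVal s))).contains b with
          | true => simp
          | false =>
            rw [if_neg (by simp), PySem.Dict.getD_of_not_contains _ _ hc, add_zero]
        rw [hfold, PySem.List.foldl_add, hres]
        have : ((bp.getD (pvVal s m) PySem.Set.empty) : List String) = bs := by
          rw [PySem.Dict.getD_eq_get?_getD, hq]; rfl
        rw [this]
        congr 1
        exact congrArg List.sum (List.map_congr_left (fun b _ => pv_counter_getD s m b))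
    · -- counter component
      show (if (PySem.Dict.counter ((List.range m).map (pvVal s))).contains (pvVal s m)
          then (PySem.Dict.counter ((List.range m).map (pvVal s))).insert (pvVal s m)
            ((PySem.Dict.counter ((List.range m).map (pvVal s))).getD (pvVal s m) 0 + 1)
          else (PySem.Dict.counter ((List.range m).map (pvVal s))).insert (pvVal s m) 1)
        = PySem.Dict.counter ((List.range (m + 1)).map (pvVal s))
      rw [hsnd, PySem.Dict.counter_append_singleton]
      cases hc : (PySem.Dict.counter ((List.range m).map (pvVal s))).contains (pvVal s m) with
      | true => simp [PySem.Dict.modify]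
      | false =>
        rw [if_neg (by simp)]
        rw [PySem.Dict.modify, PySem.Dict.getD_of_not_contains _ _ hc]
        norm_num

lemma pv_A_eq (n : Int) (k : Int) (s : List String) (pairs : List (String × String)) :
    Precious_stones n k s pairs = pvRes s (pvBP pairs) n.toNat := by
  have hbp : pairs.foldl (fun d p =>
      let d' := if d.contains p.1 then d else d.insert p.1 PySem.Set.empty
      d'.modify p.1 PySem.Set.empty (fun st => PySem.Set.add st p.2)) PySem.Dict.empty = pvBP pairs :=
    PySem.List.foldl_congr_mem _ _ _ _ (fun acc x _ => pv_bp_step_eq acc x)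
  simp only [Precious_stones]
  rw [hbp, pv_pyRange, List.foldl_map]
  have hcongr : ∀ (acc : Int × PySem.Dict String Int) (x : Nat), x ∈ List.range n.toNat →
      (fun (st : Int × PySem.Dict String Int) (i : Int) =>
        let cur := PySem.List.pyGetD s i ""
        let res :=
          match (pvBP pairs).get? cur with
          | some bs => bs.foldl (fun r b => if st.2.contains b then r + st.2.getD b 0 else r) st.1
          | none => st.1
        let sc := if st.2.contains cur then st.2.insert cur (st.2.getD cur 0 + 1) else st.2.insert cur 1
        (res, sc)) acc (x : Int) = pvStepA s (pvBP pairs) acc x := by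
    intro acc x _
    show _ = pvStepA s (pvBP pairs) acc x
    unfold pvStepA pvVal
    simp only [PySem.List.pyGetD_natCast]
  rw [PySem.List.foldl_congr_mem _ _ _ _ hcongr, pv_loopA]

lemma pv_res_eq_gen (s : List String) (d : PySem.Dict String (PySem.Set String))
    (hnd : d.keys.Nodup) (m : Nat) :
    pvRes s d m = ((pvEdges d).map (fun e => pvG s m e.1 e.2)).sum := by
  obtain ⟨items⟩ := d
  have hnd' : (items.map Prod.fst).Nodup := hnd
  rw [pvRes]
  have h1 : ∀ i : Nat,
      ((((PySem.Dict.mk items).getD (pvVal s i) PySem.Set.empty) : List String).map (fun b => pvCnt s b i)).sum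
        = (items.map (fun p => if p.1 = pvVal s i then ((p.2 : List String).map (fun b => pvCnt s b i)).sum else 0)).sum :=
    fun i => (pv_dict_sum_aux items hnd' (pvVal s i) (fun b => pvCnt s b i)).symm
  rw [List.map_congr_left (fun i _ => h1 i), pv_sum_comm]
  show _ = ((pvEdges (PySem.Dict.mk items)).map (fun e => pvG s m e.1 e.2)).sum
  rw [pvEdges, List.map_flatMap, pv_sum_flatMap]
  show (items.map (fun p => ((List.range m).map
      (fun i => if p.1 = pvVal s i then ((p.2 : List String).map (fun b => pvCnt s b i)).sum else 0)).sum)).sum = _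
  apply congrArg List.sum
  apply List.map_congr_left
  intro p _
  rw [List.map_map]
  have h2 : ((p.2 : List String).map (fun b => pvG s m p.1 b)).sum
      = ((List.range m).map (fun i => if pvVal s i == p.1 then ((p.2 : List String).map (fun b => pvCnt s b i)).sum else 0)).sum := by
    have : ∀ b, pvG s m p.1 b = (((List.range m).filter (fun i => pvVal s i == p.1)).map (fun i => pvCnt s b i)).sum := by
      intro b; rfl
    rw [List.map_congr_left (fun b _ => this b), pv_sum_comm, ← pv_sum_filter]
  rw [show ((fun e : String × String => pvG s m e.1 e.2) ∘ (fun b => (p.1, b))) = fun b => pvG s m p.1 b from rfl, h2]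
  apply congrArg List.sum
  apply List.map_congr_left
  intro i _
  by_cases h : p.1 = pvVal s i
  · simp [h]
  · simp only [h, if_false]
    rw [if_neg (by intro he; exact h (beq_iff_eq.mp he).symm)]

lemma pv_B_eq (n : Int) (k : Int) (s : List String) (pairs : List (String × String)) :
    Precious_stones_alt n k s pairs
      = ((PySem.Set.ofList pairs).map (fun e => pvG s n.toNat e.1 e.2)).sum := by
  simp only [Precious_stones_alt]
  have hrange : PySem.List.pyRange 0 (if n > 0 then n else 0) 1
      = (List.range n.toNat).map (fun k : Nat => (k : Int)) := by
    rw [pv_pyRange]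
    congr 2
    split_ifs with h
    · rfl
    · omega
  rw [hrange]
  have hpos : ∀ c, (((List.range n.toNat).map (fun k : Nat => (k : Int))).foldl
      (fun d i => d.modify (PySem.List.pyGetD s i "") [] (fun l => l ++ [i])) PySem.Dict.empty).getD c []
      = ((List.range n.toNat).filter (fun i => pvVal s i == c)).map (fun k : Nat => (k : Int)) := by
    intro c
    have hstep : (List.range n.toNat).foldl
        (fun d (i : Nat) => d.modify (PySem.List.pyGetD s (i : Int) "") [] (fun l => l ++ [(i : Int)]))
        PySem.Dict.empty
        = ((List.range n.toNat).map (fun i : Nat => (pvVal s i, (i : Int)))).foldl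
            (fun d p => d.modify p.1 [] (fun l => l ++ [p.2])) PySem.Dict.empty := by
      rw [List.foldl_map]
      apply PySem.List.foldl_congr_mem
      intro acc x _
      simp only [PySem.List.pyGetD_natCast]
      rfl
    rw [List.foldl_map, hstep, PySem.Dict.getD_foldl_modify_append, PySem.Dict.getD_empty,
      List.nil_append, List.filter_map, List.map_map]
    rfl
  simp only [hpos]
  have hinner : ∀ (p : String × String), p ∈ PySem.Set.ofList pairs → ∀ (total : Int),
      (((List.range n.toNat).filter (fun i => pvVal s i == p.1)).map (fun k : Nat => (k : Int))).foldl
        (fun t i => (((List.range n.toNat).filter (fun i => pvVal s i == p.2)).map (fun k : Nat => (k : Int))).foldl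
          (fun t j => if j < i then t + 1 else t) t) total
      = total + pvG s n.toNat p.1 p.2 := by
    intro p _ total
    have h1 : ∀ (t : Int) (i : Int),
        (((List.range n.toNat).filter (fun i => pvVal s i == p.2)).map (fun k : Nat => (k : Int))).foldl
          (fun t j => if j < i then t + 1 else t) t
        = t + ((((List.range n.toNat).filter (fun i => pvVal s i == p.2)).map (fun k : Nat => (k : Int))).countP
            (fun j => decide (j < i)) : Int) :=
      fun t i => PySem.List.foldl_ite_add_one (fun j => j < i) _ t
    rw [PySem.List.foldl_congr_mem _ _
      (fun t (i : Int) => t + ((((List.range n.toNat).filter (fun i => pvVal s i == p.2)).map (fun k : Nat => (k : Int))).countP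
            (fun j => decide (j < i)) : Int)) total
      (fun acc x _ => h1 acc x), PySem.List.foldl_add, List.map_map]
    congr 1
    apply congrArg List.sum
    apply List.map_congr_left
    intro i hi
    have him : i < n.toNat := List.mem_range.mp (List.mem_filter.mp hi).1
    show (_ : Int) = pvCnt s p.2 i
    simp only [Function.comp_apply]
    rw [List.countP_map]
    have h2 : (((List.range n.toNat).filter (fun j => pvVal s j == p.2)).countP
        (((fun j : Int => decide (j < (i : Int)))) ∘ (fun k : Nat => (k : Int))))
        = ((List.range n.toNat).filter (fun j => pvVal s j == p.2)).countP (fun j => decide (j < i)) := by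
      apply List.countP_congr
      intro x _
      simp [Function.comp, Nat.cast_lt]
    rw [h2, List.countP_filter]
    have h3 : (List.range n.toNat).countP (fun j => decide (j < i) && (pvVal s j == p.2))
        = (List.range n.toNat).countP (fun j => (pvVal s j == p.2) && decide (j < i)) :=
      List.countP_congr (by intro x _; simp [Bool.and_comm])
    rw [h3, pv_countP_range _ _ _ (Nat.le_of_lt him)]
    rfl
  rw [PySem.List.foldl_congr_mem' _ _ (fun total p => total + pvG s n.toNat p.1 p.2) 0 hinner,
    PySem.List.foldl_add, zero_add]

-- ===== VERDICT (by name: the statement is the Claim_ definition above) =====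
theorem Precious_stones_spec : Claim_equal_Precious_stones := by
  intro n k s pairs _ _
  unfold Spec_Precious_stones
  rw [pv_A_eq n k s pairs, pv_B_eq n k s pairs,
    pv_res_eq_gen s (pvBP pairs) (pv_bp_keys_nodup pairs) n.toNat]
  exact List.Perm.sum_eq (List.Perm.map _ (pv_edges_perm pairs))
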